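-- pv_equiv track=rewrite | github.com/CodeWithJuber/mizan | backend/qca/cognitive_methods.py | _derive_implications
-- ===== SOURCE A (Python) =====
-- from typing import Any, Dict, List, Optional
--
-- def _derive_implications(query: str, context: Dict) -> str:
--     """Derive broader implications and follow-up considerations."""
--     implications = []
--     q_lower = query.lower()
--
--     # Technical implications
--     if any(w in q_lower for w in ["change", "modify", "update", "refactor", "add"]):
--         implications.append("May require testing after changes")
--     if any(w in q_lower for w in ["delete", "remove", "drop"]):
--         implications.append("Destructive action — verify intent and backup state")
--     if any(w in q_lower for w in ["deploy", "release", "publish"]):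
--         implications.append("Affects production — requires careful validation")
--     if any(w in q_lower for w in ["security", "auth", "password", "token"]):
--         implications.append("Security-sensitive — handle with extra care")
--
--     # Knowledge implications
--     if any(w in q_lower for w in ["learn", "understand", "study"]):
--         implications.append("Knowledge-building — consider providing references")
--
--     return "; ".join(implications) if implications else "Standard implications — proceed normally"
-- ===== SOURCE B (Python) =====
-- _KEYWORD_RULES = [
--     ("change", 0), ("modify", 0), ("update", 0), ("refactor", 0), ("add", 0),
--     ("delete", 1), ("remove", 1), ("drop", 1),
--     ("deploy", 2), ("release", 2), ("publish", 2),
--     ("security", 3), ("auth", 3), ("password", 3), ("token", 3),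
--     ("learn", 4), ("understand", 4), ("study", 4),
-- ]
--
-- _MESSAGES = [
--     "May require testing after changes",
--     "Destructive action — verify intent and backup state",
--     "Affects production — requires careful validation",
--     "Security-sensitive — handle with extra care",
--     "Knowledge-building — consider providing references",
-- ]
--
-- def _derive_implications(query: str, context: dict) -> str:
--     # Text-driven multi-pattern scan: one pass over the positions of the query,
--     # matching every keyword at each position, instead of one substring search
--     # per keyword group.
--     q_lower = query.lower()
--     fired = set()
--     for i in range(len(q_lower)):
--         for kw, rule in _KEYWORD_RULES:
--             if q_lower.startswith(kw, i):
--                 fired.add(rule)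
--     msgs = [m for r, m in enumerate(_MESSAGES) if r in fired]
--     return "; ".join(msgs) if msgs else "Standard implications — proceed normally"
-- ===== Notes on version B (the rewrite author's own statement) =====
-- stated objective: alternative
-- what changed: A runs one substring search over the query per keyword group; B instead makes a single text-driven pass over the positions of the query, matching all keywords at each position into a set of fired rule indices, then emits the messages for the fired rules in order.
import Mathlib
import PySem

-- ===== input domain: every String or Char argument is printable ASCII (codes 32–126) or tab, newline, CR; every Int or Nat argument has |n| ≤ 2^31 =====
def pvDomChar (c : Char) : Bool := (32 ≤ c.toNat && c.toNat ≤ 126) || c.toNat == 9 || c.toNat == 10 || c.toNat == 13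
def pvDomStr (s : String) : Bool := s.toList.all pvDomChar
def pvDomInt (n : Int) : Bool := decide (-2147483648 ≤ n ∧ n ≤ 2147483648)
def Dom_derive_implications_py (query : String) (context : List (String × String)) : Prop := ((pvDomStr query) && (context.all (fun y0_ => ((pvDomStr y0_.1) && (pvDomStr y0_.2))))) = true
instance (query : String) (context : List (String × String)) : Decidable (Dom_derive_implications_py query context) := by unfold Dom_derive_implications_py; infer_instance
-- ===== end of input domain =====

-- B replaces A's per-keyword-group substring searches by one text-driven pass over the
-- positions of the query that matches every keyword at each position into a set of fired
-- rule indices (objective: alternative).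

-- ===== PORT A =====
def derive_implications_py (query : String) (context : List (String × String)) : String :=
  let implications : List String := []
  let q_lower := PySem.Str.lower query
  let implications :=
    if (["change", "modify", "update", "refactor", "add"].any (fun w => PySem.Str.isIn w q_lower))
    then implications ++ ["May require testing after changes"] else implications
  let implications :=
    if (["delete", "remove", "drop"].any (fun w => PySem.Str.isIn w q_lower))
    then implications ++ ["Destructive action — verify intent and backup state"] else implications
  let implications :=
    if (["deploy", "release", "publish"].any (fun w => PySem.Str.isIn w q_lower))
    then implications ++ ["Affects production — requires careful validation"] else implications
  let implications :=
    if (["security", "auth", "password", "token"].any (fun w => PySem.Str.isIn w q_lower))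
    then implications ++ ["Security-sensitive — handle with extra care"] else implications
  let implications :=
    if (["learn", "understand", "study"].any (fun w => PySem.Str.isIn w q_lower))
    then implications ++ ["Knowledge-building — consider providing references"] else implications
  if implications ≠ [] then PySem.Str.join "; " implications
  else "Standard implications — proceed normally"

-- ===== PORT B =====
def pvKwRules : List (List Char × Int) :=
  [ ("change".toList, 0), ("modify".toList, 0), ("update".toList, 0), ("refactor".toList, 0), ("add".toList, 0),
    ("delete".toList, 1), ("remove".toList, 1), ("drop".toList, 1),
    ("deploy".toList, 2), ("release".toList, 2), ("publish".toList, 2),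
    ("security".toList, 3), ("auth".toList, 3), ("password".toList, 3), ("token".toList, 3),
    ("learn".toList, 4), ("understand".toList, 4), ("study".toList, 4) ]

def pvMessages : List String :=
  [ "May require testing after changes",
    "Destructive action — verify intent and backup state",
    "Affects production — requires careful validation",
    "Security-sensitive — handle with extra care",
    "Knowledge-building — consider providing references" ]

def derive_implications_py_alt (query : String) (context : List (String × String)) : String :=
  let q_lower := (PySem.Str.lower query).toList
  -- q_lower.startswith(kw, i) with 0 ≤ i < len(q_lower) is exactly: kw is a prefix of q_lower.drop i
  let fired : PySem.Set Int :=
    (List.range q_lower.length).foldl (fun fired i =>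
      pvKwRules.foldl (fun fired kr =>
        if PySem.Chars.startswith (q_lower.drop i) kr.1 then PySem.Set.add fired kr.2 else fired)
        fired) PySem.Set.empty
  let msgs := ((PySem.List.enumerate pvMessages).filter
      (fun rm => PySem.Set.contains fired rm.1)).map (fun rm => rm.2)
  if msgs ≠ [] then PySem.Str.join "; " msgs
  else "Standard implications — proceed normally"

-- ===== PRECONDITION & SPEC =====
def Spec_derive_implications_py (query : String) (context : List (String × String)) (out : String) : Prop := out = derive_implications_py_alt query context
instance (query : String) (context : List (String × String)) (out : String) : Decidable (Spec_derive_implications_py query context out) := by unfold Spec_derive_implications_py; infer_instance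

-- ===== CLAIM =====
def Claim_equal_derive_implications_py : Prop := ∀ (query : String) (context : List (String × String)), Dom_derive_implications_py query context → Spec_derive_implications_py query context (derive_implications_py query context)

-- ===== LEMMAS AND PROOFS =====

-- membership after the inner fold over the rules table
theorem pv_mem_inner (rules : List (List Char × Int)) (c : List Char × Int → Bool)
    (s : PySem.Set Int) (a : Int) :
    a ∈ rules.foldl (fun s kr => if c kr then PySem.Set.add s kr.2 else s) s ↔
      a ∈ s ∨ ∃ kr ∈ rules, c kr = true ∧ kr.2 = a := by
  induction rules generalizing s with
  | nil => simp
  | cons kr rest ih =>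
    simp only [List.foldl_cons, ih, List.mem_cons]
    by_cases h : c kr = true
    · rw [if_pos h, PySem.Set.mem_add]
      constructor
      · rintro (⟨h1 | h1⟩ | ⟨x, hx, h2, h3⟩)
        · exact Or.inl h1
        · exact Or.inr ⟨kr, Or.inl rfl, h, h1.symm⟩
        · exact Or.inr ⟨x, Or.inr hx, h2, h3⟩
      · rintro (h1 | ⟨x, hx | hx, h2, h3⟩)
        · exact Or.inl (Or.inl h1)
        · exact Or.inl (Or.inr (hx ▸ h3.symm))
        · exact Or.inr ⟨x, hx, h2, h3⟩
    · rw [if_neg h]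
      constructor
      · rintro (h1 | ⟨x, hx, h2, h3⟩)
        · exact Or.inl h1
        · exact Or.inr ⟨x, Or.inr hx, h2, h3⟩
      · rintro (h1 | ⟨x, hx | hx, h2, h3⟩)
        · exact Or.inl h1
        · exact absurd (hx ▸ h2) h
        · exact Or.inr ⟨x, hx, h2, h3⟩

-- membership after the outer fold over the positions
theorem pv_mem_outer (n : Nat) (rules : List (List Char × Int)) (c : Nat → List Char × Int → Bool)
    (a : Int) :
    a ∈ (List.range n).foldl (fun s i =>
        rules.foldl (fun s kr => if c i kr then PySem.Set.add s kr.2 else s) s) PySem.Set.empty ↔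
      ∃ i < n, ∃ kr ∈ rules, c i kr = true ∧ kr.2 = a := by
  induction n with
  | zero => simp [PySem.Set.empty]
  | succ n ih =>
    rw [List.range_succ, List.foldl_append, List.foldl_cons, List.foldl_nil, pv_mem_inner, ih]
    constructor
    · rintro (⟨i, hi, hk⟩ | ⟨kr, hkr, h2, h3⟩)
      · exact ⟨i, Nat.lt_succ_of_lt hi, hk⟩
      · exact ⟨n, Nat.lt_succ_self n, kr, hkr, h2, h3⟩
    · rintro ⟨i, hi, kr, hkr, h2, h3⟩
      rcases Nat.lt_succ_iff_lt_or_eq.mp hi with h | rfl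
      · exact Or.inl ⟨i, h, kr, hkr, h2, h3⟩
      · exact Or.inr ⟨kr, hkr, h2, h3⟩

-- a nonempty keyword occurs as a substring iff it starts at some position i < length
theorem pv_exists_start_iff (s kw : List Char) (hkw : kw ≠ []) :
    (∃ i < s.length, PySem.Chars.startswith (s.drop i) kw = true) ↔
      PySem.Chars.isIn kw s = true := by
  rw [← PySem.Chars.exists_prefix_drop_iff_isIn]
  constructor
  · rintro ⟨i, _, h⟩
    exact ⟨i, (PySem.Chars.startswith_iff _ _).mp h⟩
  · rintro ⟨j, hj⟩
    by_cases hlt : j < s.length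
    · exact ⟨j, hlt, (PySem.Chars.startswith_iff _ _).mpr hj⟩
    · exfalso
      rw [List.drop_eq_nil_of_le (Nat.le_of_not_lt hlt)] at hj
      exact hkw (List.prefix_nil.mp hj)

-- fired rule r ↔ some keyword of rule r occurs in the query (stated over the literal table)
theorem pv_fired_iff (q : List Char) (r : Int) :
    (∃ i < q.length, ∃ kr ∈ pvKwRules,
        PySem.Chars.startswith (q.drop i) kr.1 = true ∧ kr.2 = r) ↔
      ∃ kr ∈ pvKwRules, kr.2 = r ∧ PySem.Chars.isIn kr.1 q = true := by
  constructor
  · rintro ⟨i, hi, kr, hkr, h2, h3⟩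
    refine ⟨kr, hkr, h3, ?_⟩
    have hne : kr.1 ≠ [] := by
      unfold pvKwRules at hkr
      fin_cases hkr <;> simp
    exact (pv_exists_start_iff q kr.1 hne).mp ⟨i, hi, h2⟩
  · rintro ⟨kr, hkr, h3, h2⟩
    have hne : kr.1 ≠ [] := by
      unfold pvKwRules at hkr
      fin_cases hkr <;> simp
    obtain ⟨i, hi, hs⟩ := (pv_exists_start_iff q kr.1 hne).mpr h2
    exact ⟨i, hi, kr, hkr, hs, h3⟩

-- ===== VERDICT =====
set_option maxHeartbeats 2000000 in
theorem derive_implications_py_spec : Claim_equal_derive_implications_py := by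
  intro query context _
  unfold Spec_derive_implications_py
  simp only [derive_implications_py, derive_implications_py_alt]
  set q : List Char := (PySem.Str.lower query).toList with hq
  have hcont : ∀ r : Int,
      (PySem.Set.contains ((List.range q.length).foldl (fun fired i =>
        pvKwRules.foldl (fun fired kr =>
          if PySem.Chars.startswith (q.drop i) kr.1 then PySem.Set.add fired kr.2 else fired)
          fired) PySem.Set.empty) r)
      = decide (∃ kr ∈ pvKwRules, kr.2 = r ∧ PySem.Chars.isIn kr.1 q = true) := by
    intro r
    rw [Bool.eq_iff_iff, PySem.Set.contains_iff, decide_eq_true_iff]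
    rw [pv_mem_outer q.length pvKwRules
      (fun i kr => PySem.Chars.startswith (q.drop i) kr.1) r]
    exact pv_fired_iff q r
  simp only [hcont]
  have hA : ∀ w : String, PySem.Str.isIn w (PySem.Str.lower query)
      = PySem.Chars.isIn w.toList q := by
    intro w; rw [hq]; simp [PySem.Str.isIn]
  have hgrp : ∀ r : Int, decide (∃ kr ∈ pvKwRules, kr.2 = r ∧ PySem.Chars.isIn kr.1 q = true)
      = pvKwRules.any (fun kr => decide (kr.2 = r) && PySem.Chars.isIn kr.1 q) := by
    intro r
    rw [Bool.eq_iff_iff, decide_eq_true_iff, List.any_eq_true]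
    constructor
    · rintro ⟨kr, h1, h2, h3⟩; exact ⟨kr, h1, by simp [h2, h3]⟩
    · rintro ⟨kr, h1, h⟩
      simp only [Bool.and_eq_true, decide_eq_true_iff] at h
      exact ⟨kr, h1, h.1, h.2⟩
  simp only [hgrp]
  simp only [pvMessages, PySem.List.enumerate_cons, PySem.List.enumerate_nil,
    List.filter_cons, List.filter_nil, hA]
  norm_num
  by_cases h1 : PySem.Chars.isIn ['c', 'h', 'a', 'n', 'g', 'e'] q = true ∨ PySem.Chars.isIn ['m', 'o', 'd', 'i', 'f', 'y'] q = true ∨ PySem.Chars.isIn ['u', 'p', 'd', 'a', 't', 'e'] q = true ∨ PySem.Chars.isIn ['r', 'e', 'f', 'a', 'c', 't', 'o', 'r'] q = true ∨ PySem.Chars.isIn ['a', 'd', 'd'] q = true <;>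
  by_cases h2 : PySem.Chars.isIn ['d', 'e', 'l', 'e', 't', 'e'] q = true ∨ PySem.Chars.isIn ['r', 'e', 'm', 'o', 'v', 'e'] q = true ∨ PySem.Chars.isIn ['d', 'r', 'o', 'p'] q = true <;>
  by_cases h3 : PySem.Chars.isIn ['d', 'e', 'p', 'l', 'o', 'y'] q = true ∨ PySem.Chars.isIn ['r', 'e', 'l', 'e', 'a', 's', 'e'] q = true ∨ PySem.Chars.isIn ['p', 'u', 'b', 'l', 'i', 's', 'h'] q = true <;>
  by_cases h4 : PySem.Chars.isIn ['s', 'e', 'c', 'u', 'r', 'i', 't', 'y'] q = true ∨ PySem.Chars.isIn ['a', 'u', 't', 'h'] q = true ∨ PySem.Chars.isIn ['p', 'a', 's', 's', 'w', 'o', 'r', 'd'] q = true ∨ PySem.Chars.isIn ['t', 'o', 'k', 'e', 'n'] q = true <;>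
  by_cases h5 : PySem.Chars.isIn ['l', 'e', 'a', 'r', 'n'] q = true ∨ PySem.Chars.isIn ['u', 'n', 'd', 'e', 'r', 's', 't', 'a', 'n', 'd'] q = true ∨ PySem.Chars.isIn ['s', 't', 'u', 'd', 'y'] q = true <;>
  simp [h1, h2, h3, h4, h5, pvKwRules]
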